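-- pv_equiv track=rewrite | github.com/tyler-pruitt/PHYS-129L | hw3_3658887/ex5_hw3_3658887.py | mini_battle
-- ===== SOURCE A (Python) =====
-- def mini_battle(roll_attackers,roll_defenders,n_attackers,n_defenders):
--     for i in range(min(min(n_defenders, 2),min(n_attackers,3))):
--         if roll_attackers[i] > roll_defenders[i]:
--             n_defenders -= 1
--         elif roll_attackers[i] < roll_defenders[i]:
--             n_attackers -= 1
--         else:
--             n_attackers -= 1
--     return n_attackers, n_defenders
-- ===== SOURCE B (Python) =====
-- def mini_battle(roll_attackers, roll_defenders, n_attackers, n_defenders):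
--     def go(pairs, na, nd):
--         if not pairs:
--             return na, nd
--         a, d = pairs[0]
--         if a > d:
--             return go(pairs[1:], na, nd - 1)
--         return go(pairs[1:], na - 1, nd)
--     k = min(n_defenders, 2, n_attackers, 3)
--     return go(list(zip(roll_attackers, roll_defenders))[:max(k, 0)], n_attackers, n_defenders)
-- ===== Notes on version B (the rewrite author's own statement) =====
-- stated objective: alternative
-- what changed: A loops over indices mutating the two counters in place; B first zips the two roll lists and truncates to the battle size, then resolves the battle by structural recursion over that pair list (no indexing, no loop, no counter mutation).
import Mathlib
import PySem

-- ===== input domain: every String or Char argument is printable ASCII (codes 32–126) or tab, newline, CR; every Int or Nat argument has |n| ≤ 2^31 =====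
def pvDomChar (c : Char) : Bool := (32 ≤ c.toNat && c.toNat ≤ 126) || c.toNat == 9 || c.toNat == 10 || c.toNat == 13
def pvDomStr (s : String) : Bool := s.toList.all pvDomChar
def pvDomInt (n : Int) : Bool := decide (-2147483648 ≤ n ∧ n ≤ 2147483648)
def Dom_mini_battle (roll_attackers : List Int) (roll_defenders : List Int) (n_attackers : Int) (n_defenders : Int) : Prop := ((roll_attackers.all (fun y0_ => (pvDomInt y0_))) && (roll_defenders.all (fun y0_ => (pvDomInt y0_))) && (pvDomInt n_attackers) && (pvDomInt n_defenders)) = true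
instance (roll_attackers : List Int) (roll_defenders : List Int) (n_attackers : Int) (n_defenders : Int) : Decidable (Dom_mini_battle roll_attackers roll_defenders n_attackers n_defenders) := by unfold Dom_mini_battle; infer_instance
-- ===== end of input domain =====

-- B zips the two roll lists, truncates to the battle size, and resolves casualties by structural recursion
-- over that pair list instead of A's index loop mutating the two counters (objective: alternative).

-- ===== PORT A =====
-- the loop body: per-iteration branching that mutates (n_attackers, n_defenders)
def miniBattleStepA (roll_attackers roll_defenders : List Int) (st : Int × Int) (i : Int) : Int × Int :=
  if PySem.List.pyGetD roll_attackers i 0 > PySem.List.pyGetD roll_defenders i 0 then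
    (st.1, st.2 - 1)
  else if PySem.List.pyGetD roll_attackers i 0 < PySem.List.pyGetD roll_defenders i 0 then
    (st.1 - 1, st.2)
  else
    (st.1 - 1, st.2)

def mini_battle (roll_attackers : List Int) (roll_defenders : List Int) (n_attackers : Int) (n_defenders : Int) : Int × Int :=
  (PySem.List.pyRange 0 (min (min n_defenders 2) (min n_attackers 3)) 1).foldl
    (miniBattleStepA roll_attackers roll_defenders) (n_attackers, n_defenders)

-- ===== PORT B =====
-- Source B's inner 'go': structural recursion over the list of (attacker, defender) roll pairs
def miniBattleGo : List (Int × Int) → Int → Int → Int × Int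
  | [], na, nd => (na, nd)
  | (a, d) :: rest, na, nd =>
      if a > d then miniBattleGo rest na (nd - 1) else miniBattleGo rest (na - 1) nd

def mini_battle_alt (roll_attackers : List Int) (roll_defenders : List Int) (n_attackers : Int) (n_defenders : Int) : Int × Int :=
  let k : Int := min (min (min n_defenders 2) n_attackers) 3
  miniBattleGo (PySem.List.slice (roll_attackers.zip roll_defenders) none (some (max k 0)))
    n_attackers n_defenders

-- ===== PRECONDITION & SPEC =====
-- Pre_ excludes exactly the inputs where A raises IndexError: the battle size k exceeds a roll list's length.
def Pre_mini_battle (roll_attackers : List Int) (roll_defenders : List Int) (n_attackers : Int) (n_defenders : Int) : Prop :=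
  min (min n_defenders 2) (min n_attackers 3) ≤ (roll_attackers.length : Int) ∧
  min (min n_defenders 2) (min n_attackers 3) ≤ (roll_defenders.length : Int)
instance (roll_attackers : List Int) (roll_defenders : List Int) (n_attackers : Int) (n_defenders : Int) : Decidable (Pre_mini_battle roll_attackers roll_defenders n_attackers n_defenders) := by unfold Pre_mini_battle; infer_instance
def pvWitness_mini_battle : List Int × List Int × Int × Int := ([3, 1], [2, 2], 5, 4)
def Spec_mini_battle (roll_attackers : List Int) (roll_defenders : List Int) (n_attackers : Int) (n_defenders : Int) (out : Int × Int) : Prop := out = mini_battle_alt roll_attackers roll_defenders n_attackers n_defenders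
instance (roll_attackers : List Int) (roll_defenders : List Int) (n_attackers : Int) (n_defenders : Int) (out : Int × Int) : Decidable (Spec_mini_battle roll_attackers roll_defenders n_attackers n_defenders out) := by unfold Spec_mini_battle; infer_instance

-- ===== CLAIM (what is proved, stated in full; the proofs are below) =====
def Claim_equal_mini_battle : Prop := ∀ (roll_attackers : List Int) (roll_defenders : List Int) (n_attackers : Int) (n_defenders : Int), Dom_mini_battle roll_attackers roll_defenders n_attackers n_defenders → Pre_mini_battle roll_attackers roll_defenders n_attackers n_defenders → Spec_mini_battle roll_attackers roll_defenders n_attackers n_defenders (mini_battle roll_attackers roll_defenders n_attackers n_defenders)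

-- ===== LEMMAS AND PROOFS =====

-- A's fold over an index range equals B's recursion over the corresponding zipped pairs
theorem stepA_foldl_eq_go (ra rd : List Int) (a : Int) (n : Nat) (na nd : Int)
    (ha : a.toNat + n ≤ ra.length) (hd : a.toNat + n ≤ rd.length) (h0 : 0 ≤ a) :
    (PySem.List.pyRange a (a + n) 1).foldl (miniBattleStepA ra rd) (na, nd) =
      miniBattleGo (((ra.drop a.toNat).zip (rd.drop a.toNat)).take n) na nd := by
  induction n generalizing a na nd with
  | zero =>
    simp [miniBattleGo]
  | succ m ih =>
    have hlt : a < a + (m + 1 : Nat) := by push_cast; omega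
    rw [PySem.List.pyRange_one_cons hlt, List.foldl_cons]
    have hra : a.toNat < ra.length := by omega
    have hrd : a.toNat < rd.length := by omega
    have hdz : (ra.drop a.toNat).zip (rd.drop a.toNat)
        = (ra[a.toNat], rd[a.toNat]) :: ((ra.drop (a.toNat+1)).zip (rd.drop (a.toNat+1))) := by
      rw [List.drop_eq_getElem_cons hra, List.drop_eq_getElem_cons hrd, List.zip_cons_cons]
    have hstep : miniBattleStepA ra rd (na, nd) a =
        if ra[a.toNat] > rd[a.toNat] then (na, nd - 1) else (na - 1, nd) := by
      unfold miniBattleStepA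
      rw [PySem.List.pyGetD_eq_getElem ra 0 h0 (by omega), PySem.List.pyGetD_eq_getElem rd 0 h0 (by omega)]
      split_ifs with h1 h2 <;> rfl
    have harith : a + (m + 1 : Nat) = (a + 1) + (m : Nat) := by push_cast; ring
    rw [hstep, harith, hdz, List.take_succ_cons]
    have h1toNat : (a + 1).toNat = a.toNat + 1 := by omega
    split_ifs with h
    · rw [ih (a + 1) na (nd - 1) (by omega) (by omega) (by omega), h1toNat]
      simp [miniBattleGo, h]
    · rw [ih (a + 1) (na - 1) nd (by omega) (by omega) (by omega), h1toNat]
      simp [miniBattleGo, h]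

-- ===== VERDICT (by name: the statement is the Claim_ definition above) =====
theorem mini_battle_spec : Claim_equal_mini_battle := by
  intro ra rd na nd _ hpre
  unfold Pre_mini_battle at hpre
  obtain ⟨hp1, hp2⟩ := hpre
  simp only [Spec_mini_battle, mini_battle, mini_battle_alt]
  set kA : Int := min (min nd 2) (min na 3) with hkA
  have hkB : min (min (min nd 2) na) 3 = kA := by omega
  rw [hkB, PySem.List.slice_to _ (by omega : (0:Int) ≤ max kA 0)]
  by_cases h : kA ≤ 0
  · have : (max kA 0).toNat = 0 := by omega
    rw [this, PySem.List.pyRange_one_eq_nil (by omega : kA ≤ 0)]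
    simp [miniBattleGo]
  · have hk0 : kA = (0:Int) + (kA.toNat : Nat) := by omega
    have hmax : (max kA 0).toNat = kA.toNat := by omega
    rw [hmax, hk0,
      stepA_foldl_eq_go ra rd 0 kA.toNat na nd (by omega) (by omega) le_rfl]
    simp [hmax]
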